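-- pv_equiv track=rewrite | github.com/theresaswayne/Coursework | 6001x/midterm/midterm07.py | dict_interdiff
-- ===== SOURCE A (Python) =====
-- def dict_interdiff(d1, d2):
--     '''
--     d1, d2: dicts whose keys and values are integers
--     Returns a tuple of dictionaries according to the instructions above
--     '''
--
--     d_intersect = {} #empty dict
--     d_diff = {}
--
--     #find intersection
--
--     for key in d1:
--         if key in d2:
--             d_intersect[key] = f(d1[key],d2[key])
--
--     # find diff
--
--     for key in d1:
--         if key not in d2:
--             d_diff[key] = d1[key]
--
--     for key in d2:
--         if key not in d1:
--             d_diff[key] = d2[key]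
--
--     return (d_intersect, d_diff)
--
-- def f(x,y):
--     '''
--     x, y: ints
--     returns sum
--     '''
--     return x + y
-- ===== SOURCE B (Python) =====
-- def dict_interdiff(d1, d2):
--     '''
--     d1, d2: dicts whose keys and values are integers
--     Returns (intersection dict with summed values, symmetric-difference dict)
--     '''
--     # merge-then-classify: build ONE running-total dict over both inputs,
--     # then split its entries by whether the key occurs in both dicts.
--     merged = dict(d1)
--     for k, v in d2.items():
--         merged[k] = merged.get(k, 0) + v
--     d_intersect = {}
--     d_diff = {}
--     for k, v in merged.items():
--         if k in d1 and k in d2: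
--             d_intersect[k] = v
--         else:
--             d_diff[k] = v
--     return (d_intersect, d_diff)
-- ===== Notes on version B (the rewrite author's own statement) =====
-- stated objective: alternative
-- what changed: A's three filtered membership loops become a merge-then-classify pass: one running-total dict accumulates every entry of both inputs (common keys sum automatically), then a single partition of the merged dict's items yields the intersection and the symmetric difference; the helper f disappears.
import Mathlib
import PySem

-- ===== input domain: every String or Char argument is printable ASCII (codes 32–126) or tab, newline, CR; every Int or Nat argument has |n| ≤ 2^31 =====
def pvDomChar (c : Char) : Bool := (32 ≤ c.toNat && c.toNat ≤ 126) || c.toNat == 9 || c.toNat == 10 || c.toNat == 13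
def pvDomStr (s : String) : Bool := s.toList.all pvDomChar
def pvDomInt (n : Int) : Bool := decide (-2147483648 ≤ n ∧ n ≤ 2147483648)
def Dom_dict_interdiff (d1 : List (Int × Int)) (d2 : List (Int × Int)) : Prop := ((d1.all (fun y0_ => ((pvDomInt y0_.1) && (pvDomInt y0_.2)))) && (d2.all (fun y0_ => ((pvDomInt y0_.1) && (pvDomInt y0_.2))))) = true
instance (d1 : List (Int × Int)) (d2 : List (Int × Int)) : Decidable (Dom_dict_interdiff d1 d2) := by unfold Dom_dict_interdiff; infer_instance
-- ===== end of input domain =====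

-- B replaces A's three filtered membership loops by merge-then-classify: one running-total dict
-- accumulated over both inputs, then a single partition of its entries (objective: alternative).


-- ===== PORT A =====
-- helper f(x, y) = x + y
def pvF (x y : Int) : Int := x + y

-- literal port: loop 1 builds d_intersect over d1's keys, loop 2 the d1-only part of d_diff,
-- loop 3 the d2-only part; `key in d2` = Dict.contains, `d2[key]` = lookup
def dict_interdiff (d1 : List (Int × Int)) (d2 : List (Int × Int)) : (List (Int × Int)) × (List (Int × Int)) :=
  let dd1 : PySem.Dict Int Int := PySem.Dict.mk d1
  let dd2 : PySem.Dict Int Int := PySem.Dict.mk d2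
  let dIntersect : PySem.Dict Int Int :=
    d1.foldl (fun acc kv =>
      if dd2.contains kv.1 then acc.insert kv.1 (pvF kv.2 (dd2.getD kv.1 0)) else acc)
      PySem.Dict.empty
  let dDiff : PySem.Dict Int Int :=
    d1.foldl (fun acc kv =>
      if !dd2.contains kv.1 then acc.insert kv.1 kv.2 else acc)
      PySem.Dict.empty
  let dDiff2 : PySem.Dict Int Int :=
    d2.foldl (fun acc kv =>
      if !dd1.contains kv.1 then acc.insert kv.1 kv.2 else acc)
      dDiff
  (dIntersect.items, dDiff2.items)

-- ===== PORT B =====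
-- literal port of Source B: merged = dict(d1) then accumulate d2 into it (merged.get(k,0)+v),
-- then one if/else pass over merged.items partitions into (d_intersect, d_diff)
def dict_interdiff_alt (d1 : List (Int × Int)) (d2 : List (Int × Int)) : (List (Int × Int)) × (List (Int × Int)) :=
  let merged : PySem.Dict Int Int :=
    d2.foldl (fun m kv => m.insert kv.1 (m.getD kv.1 0 + kv.2)) (PySem.Dict.mk d1)
  let p : PySem.Dict Int Int × PySem.Dict Int Int :=
    merged.items.foldl (fun st kv =>
      if (PySem.Dict.mk d1).contains kv.1 && (PySem.Dict.mk d2).contains kv.1 then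
        (st.1.insert kv.1 kv.2, st.2)
      else
        (st.1, st.2.insert kv.1 kv.2))
      (PySem.Dict.empty, PySem.Dict.empty)
  (p.1.items, p.2.items)

-- ===== PRECONDITION & SPEC =====
-- Python dict keys are unique; Pre_ only states that invariant of the argument type
-- (as association lists) — it excludes no input the Python function actually receives.
def Pre_dict_interdiff (d1 : List (Int × Int)) (d2 : List (Int × Int)) : Prop :=
  (d1.map Prod.fst).Nodup ∧ (d2.map Prod.fst).Nodup
instance (d1 : List (Int × Int)) (d2 : List (Int × Int)) : Decidable (Pre_dict_interdiff d1 d2) := by unfold Pre_dict_interdiff; infer_instance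

def pvWitness_dict_interdiff : (List (Int × Int)) × (List (Int × Int)) :=
  ([(1, 2), (3, 4)], [(1, 10), (5, 6)])

def Spec_dict_interdiff (d1 : List (Int × Int)) (d2 : List (Int × Int)) (out : (List (Int × Int)) × (List (Int × Int))) : Prop := out = dict_interdiff_alt d1 d2
instance (d1 : List (Int × Int)) (d2 : List (Int × Int)) (out : (List (Int × Int)) × (List (Int × Int))) : Decidable (Spec_dict_interdiff d1 d2 out) := by unfold Spec_dict_interdiff; infer_instance

-- ===== CLAIM (what is proved, stated in full; the proofs are below) =====
def Claim_equal_dict_interdiff : Prop := ∀ (d1 : List (Int × Int)) (d2 : List (Int × Int)), Dom_dict_interdiff d1 d2 → Pre_dict_interdiff d1 d2 → Spec_dict_interdiff d1 d2 (dict_interdiff d1 d2)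

-- ===== LEMMAS AND PROOFS =====

theorem merged_getD (l : List (Int × Int)) (d : PySem.Dict Int Int) (k : Int) :
    (l.foldl (fun m kv => m.insert kv.1 (m.getD kv.1 0 + kv.2)) d).getD k 0
      = d.getD k 0 + ((l.filter (fun kv => kv.1 == k)).map Prod.snd).sum := by
  induction l generalizing d with
  | nil => simp
  | cons kv rest ih =>
    simp only [List.foldl_cons, ih, List.filter_cons]
    by_cases h : kv.1 = k
    · simp [h, add_assoc]
    · simp [PySem.Dict.getD_insert, Ne.symm h, h, beq_iff_eq]

theorem set_update_nodup (xs : List Int) (s : List Int) (h : xs.Nodup) :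
    PySem.Set.update s xs = s ++ xs.filter (fun x => !s.contains x) := by
  induction xs generalizing s with
  | nil => simp [PySem.Set.update]
  | cons x rest ih =>
    simp only [List.nodup_cons] at h
    simp only [PySem.Set.update, List.foldl_cons, PySem.Set.add, PySem.Set.contains] at *
    by_cases hx : s.contains x = true
    · rw [if_pos hx]
      simp only [List.filter_cons, hx, Bool.not_true]
      rw [if_neg (by simp)]
      exact ih s h.2
    · rw [if_neg hx, ih (s ++ [x]) h.2]
      simp only [List.filter_cons]
      rw [if_pos (by simp at hx ⊢; exact hx)]
      simp only [List.append_assoc, List.singleton_append]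
      congr 1
      congr 1
      apply List.filter_congr
      intro y hy
      simp only [List.contains_append, Bool.not_or]
      simp
      intro _
      rintro rfl
      exact h.1 hy

theorem fused_pair (q : (Int × Int) → Bool) (l : List (Int × Int))
    (i df : PySem.Dict Int Int) :
    l.foldl (fun st kv =>
      if q kv then (st.1.insert kv.1 kv.2, st.2) else (st.1, st.2.insert kv.1 kv.2)) (i, df)
    = (l.foldl (fun acc kv => if q kv then acc.insert kv.1 kv.2 else acc) i,
       l.foldl (fun acc kv => if !q kv then acc.insert kv.1 kv.2 else acc) df) := by
  induction l generalizing i df with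
  | nil => rfl
  | cons kv rest ih =>
    simp only [List.foldl_cons]
    by_cases h : q kv = true
    · rw [if_pos h, if_pos h, if_neg (by simp [h])]; exact ih _ _
    · rw [if_neg h, if_neg h, if_pos (by simp [h])]; exact ih _ _

theorem lookup_sum (d2 : List (Int × Int)) (h2 : (d2.map Prod.fst).Nodup) (k : Int) :
    ((d2.filter (fun kv => kv.1 == k)).map Prod.snd).sum
      = if (PySem.Dict.mk d2).contains k then (PySem.Dict.mk d2).getD k 0 else 0 := by
  induction d2 with
  | nil => simp [PySem.Dict.contains]
  | cons kv rest ih =>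
    simp only [List.map_cons, List.nodup_cons] at h2
    simp only [List.filter_cons]
    by_cases h : kv.1 = k
    · rw [if_pos (by simp [h])]
      have hrest : rest.filter (fun kv => kv.1 == k) = [] := by
        apply List.filter_eq_nil_iff.mpr
        intro p hp
        simp only [beq_iff_eq]
        intro hk
        exact h2.1 (by rw [h, ← hk]; exact List.mem_map_of_mem hp)
      have hc : (PySem.Dict.mk (kv :: rest)).contains k = true := by
        simp [PySem.Dict.contains, h]
      rw [hrest, if_pos hc]
      simp [PySem.Dict.getD, PySem.Dict.get?, h]
    · rw [if_neg (by simp [h])]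
      rw [ih h2.2]
      have hcc : (PySem.Dict.mk (kv :: rest)).contains k = (PySem.Dict.mk rest).contains k := by
        simp [PySem.Dict.contains, h]
      have hgg : (PySem.Dict.mk (kv :: rest)).getD k 0 = (PySem.Dict.mk rest).getD k 0 := by
        simp [PySem.Dict.getD, PySem.Dict.get?, h]
      rw [hcc, hgg]

-- membership in the list gives contains = true on the wrapped dict
theorem contains_of_mem {l : List (Int × Int)} {kv : Int × Int} (h : kv ∈ l) :
    (PySem.Dict.mk l).contains kv.1 = true := by
  simp only [PySem.Dict.contains, List.any_eq_true]
  exact ⟨kv, h, by simp⟩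

theorem dict_interdiff_eq_alt (d1 d2 : List (Int × Int))
    (h1 : (d1.map Prod.fst).Nodup) (h2 : (d2.map Prod.fst).Nodup) :
    dict_interdiff d1 d2 = dict_interdiff_alt d1 d2 := by
  -- abbreviations
  set dd1 := PySem.Dict.mk d1 with hdd1
  set dd2 := PySem.Dict.mk d2 with hdd2
  have hkeys1 : dd1.keys = d1.map Prod.fst := rfl
  have hnd1 : dd1.keys.Nodup := h1
  -- the canonical intersection and diff lists
  set I : List (Int × Int) :=
    (d1.filter (fun kv => dd2.contains kv.1)).map (fun kv => (kv.1, pvF kv.2 (dd2.getD kv.1 0))) with hI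
  set D : List (Int × Int) :=
    d1.filter (fun kv => !dd2.contains kv.1) ++ d2.filter (fun kv => !dd1.contains kv.1) with hD
  -- ===== A side =====
  have hA1 : (d1.foldl (fun acc kv =>
      if dd2.contains kv.1 then acc.insert kv.1 (pvF kv.2 (dd2.getD kv.1 0)) else acc)
      PySem.Dict.empty).items = I := by
    rw [PySem.List.foldl_if_eq_foldl_filter]
    rw [PySem.Dict.items_foldl_insert_fresh _ Prod.fst
        (fun kv => pvF kv.2 (dd2.getD kv.1 0)) _
        (fun a _ => PySem.Dict.contains_empty a.1)
        (h1.sublist (List.filter_sublist.map _))]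
    simp [hI, PySem.Dict.empty]
  have hA2 : (d1.foldl (fun acc kv =>
      if !dd2.contains kv.1 then acc.insert kv.1 kv.2 else acc)
      PySem.Dict.empty).items = d1.filter (fun kv => !dd2.contains kv.1) := by
    rw [PySem.List.foldl_if_eq_foldl_filter]
    rw [PySem.Dict.items_foldl_insert_fresh _ Prod.fst Prod.snd _
        (fun a _ => PySem.Dict.contains_empty a.1)
        (h1.sublist (List.filter_sublist.map _))]
    simp [PySem.Dict.empty]
  have hA3 : ((d2.foldl (fun acc kv =>
      if !dd1.contains kv.1 then acc.insert kv.1 kv.2 else acc)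
      (PySem.Dict.mk (d1.filter (fun kv => !dd2.contains kv.1))))).items = D := by
    rw [PySem.List.foldl_if_eq_foldl_filter]
    rw [PySem.Dict.items_foldl_insert_fresh _ Prod.fst Prod.snd _ ?fresh
        (h2.sublist (List.filter_sublist.map _))]
    · simp [hD]
    case fresh =>
      intro a ha
      rw [List.mem_filter] at ha
      have hc1 : dd1.contains a.1 = false := by
        revert ha; cases h : dd1.contains a.1 <;> simp [h]
      simp only [PySem.Dict.contains, List.any_eq_false] at hc1 ⊢
      intro p hp
      exact hc1 p (List.mem_of_mem_filter hp)
  -- ===== B side =====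
  set merged : PySem.Dict Int Int :=
    d2.foldl (fun m kv => m.insert kv.1 (m.getD kv.1 0 + kv.2)) dd1 with hmerged
  have hNK : merged.keys.Nodup := by
    rw [hmerged]
    exact PySem.Dict.nodup_keys_foldl_insert_key d2 Prod.fst (fun m kv => m.getD kv.1 0 + kv.2) dd1 hnd1
  have hmem1 : ∀ kv ∈ d1, dd1.contains kv.1 = true := fun kv h => contains_of_mem h
  have hcl : ∀ x : Int, (d1.map Prod.fst).contains x = dd1.contains x := by
    intro x
    rw [PySem.Dict.contains_eq_decide_mem_keys dd1 x, hkeys1]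
    simp
  have hKeys : merged.keys
      = d1.map Prod.fst ++ (d2.filter (fun kv => !dd1.contains kv.1)).map Prod.fst := by
    rw [hmerged]
    rw [PySem.Dict.keys_foldl_insert_key d2 Prod.fst (fun m kv => m.getD kv.1 0 + kv.2) dd1]
    rw [hkeys1, set_update_nodup _ _ h2, List.filter_map]
    congr 1
    congr 1
    apply List.filter_congr
    intro kv _
    simp only [Function.comp_apply, hcl kv.1]
  -- lookup in merged
  have hget1 : ∀ kv ∈ d1, merged.getD kv.1 0
      = kv.2 + (if dd2.contains kv.1 then dd2.getD kv.1 0 else 0) := by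
    intro kv hkv
    rw [hmerged, merged_getD, lookup_sum d2 h2 kv.1,
        PySem.Dict.getD_of_mem_items dd1 hkv hnd1]
  have hget2 : ∀ kv ∈ d2, dd1.contains kv.1 = false → merged.getD kv.1 0 = kv.2 := by
    intro kv hkv hc
    rw [hmerged, merged_getD, lookup_sum d2 h2 kv.1,
        PySem.Dict.getD_of_not_contains dd1 0 hc,
        if_pos (contains_of_mem hkv),
        PySem.Dict.getD_of_mem_items dd2 hkv h2]
    ring
  set g : (Int × Int) → (Int × Int) :=
    fun kv => (kv.1, kv.2 + if dd2.contains kv.1 then dd2.getD kv.1 0 else 0) with hg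
  have hItems : merged.items = d1.map g ++ d2.filter (fun kv => !dd1.contains kv.1) := by
    rw [PySem.Dict.items_eq_map_keys merged hNK 0, hKeys, List.map_append,
        List.map_map, List.map_map]
    congr 1
    · apply List.map_congr_left
      intro kv hkv
      simp only [Function.comp_apply, hg]
      rw [hget1 kv hkv]
    · have : ∀ kv ∈ d2.filter (fun kv => !dd1.contains kv.1),
          ((fun k => (k, merged.getD k 0)) ∘ Prod.fst) kv = kv := by
        intro kv hkv
        rw [List.mem_filter] at hkv
        have hc1 : dd1.contains kv.1 = false := by
          have := hkv.2; revert this; cases h : dd1.contains kv.1 <;> simp [h]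
        simp only [Function.comp_apply]
        rw [hget2 kv hkv.1 hc1]
      rw [List.map_congr_left this]
      simp
  -- the classification pass
  have hq : ∀ kv : Int × Int, (g kv).1 = kv.1 := fun kv => rfl
  set q : (Int × Int) → Bool := fun kv => dd1.contains kv.1 && dd2.contains kv.1 with hqdef
  have hfq : merged.items.filter q = I := by
    rw [hItems, List.filter_append, List.filter_map]
    have e2 : (d2.filter (fun kv => !dd1.contains kv.1)).filter q = [] := by
      apply List.filter_eq_nil_iff.mpr
      intro kv hkv
      rw [List.mem_filter] at hkv
      have hc1 : dd1.contains kv.1 = false := by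
        have := hkv.2; revert this; cases h : dd1.contains kv.1 <;> simp [h]
      simp [hqdef, hc1]
    have e1 : d1.filter (q ∘ g) = d1.filter (fun kv => dd2.contains kv.1) := by
      apply List.filter_congr
      intro kv hkv
      simp [hqdef, hq kv, hmem1 kv hkv]
    rw [e1, e2, List.append_nil, hI]
    apply List.map_congr_left
    intro kv hkv
    rw [List.mem_filter] at hkv
    simp only [hg, hkv.2, if_pos, pvF]
  have hfnq : merged.items.filter (fun kv => !q kv) = D := by
    rw [hItems, List.filter_append, List.filter_map]
    have e1 : d1.filter ((fun kv => !q kv) ∘ g) = d1.filter (fun kv => !dd2.contains kv.1) := by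
      apply List.filter_congr
      intro kv hkv
      simp [hqdef, hq kv, hmem1 kv hkv]
    have e2 : (d2.filter (fun kv => !dd1.contains kv.1)).filter (fun kv => !q kv)
        = d2.filter (fun kv => !dd1.contains kv.1) := by
      apply List.filter_eq_self.mpr
      intro kv hkv
      rw [List.mem_filter] at hkv
      have hc1 : dd1.contains kv.1 = false := by
        have := hkv.2; revert this; cases h : dd1.contains kv.1 <;> simp [h]
      simp [hqdef, hc1]
    rw [e1, e2, hD]
    congr 1
    have : ∀ kv ∈ d1.filter (fun kv => !dd2.contains kv.1), g kv = kv := by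
      intro kv hkv
      rw [List.mem_filter] at hkv
      have hc2 : dd2.contains kv.1 = false := by
        have := hkv.2; revert this; cases h : dd2.contains kv.1 <;> simp [h]
      simp [hg, hc2]
    rw [List.map_congr_left this]
    simp
  -- assemble
  have hB : (merged.items.foldl (fun st kv =>
      if dd1.contains kv.1 && dd2.contains kv.1 then
        (st.1.insert kv.1 kv.2, st.2)
      else
        (st.1, st.2.insert kv.1 kv.2))
      (PySem.Dict.empty, PySem.Dict.empty)) = (PySem.Dict.mk I, PySem.Dict.mk D) := by
    rw [show (fun st : PySem.Dict Int Int × PySem.Dict Int Int => fun kv : Int × Int =>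
      if dd1.contains kv.1 && dd2.contains kv.1 then
        (st.1.insert kv.1 kv.2, st.2)
      else
        (st.1, st.2.insert kv.1 kv.2)) = (fun st kv =>
      if q kv then (st.1.insert kv.1 kv.2, st.2) else (st.1, st.2.insert kv.1 kv.2)) from rfl]
    rw [fused_pair q merged.items PySem.Dict.empty PySem.Dict.empty]
    have hnodL : (merged.items.map Prod.fst).Nodup := hNK
    have c1 : (merged.items.foldl (fun acc kv => if q kv then acc.insert kv.1 kv.2 else acc)
        PySem.Dict.empty) = PySem.Dict.mk I := by
      apply PySem.Dict.ext
      rw [PySem.List.foldl_if_eq_foldl_filter]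
      rw [PySem.Dict.items_foldl_insert_fresh _ Prod.fst Prod.snd _
          (fun a _ => PySem.Dict.contains_empty a.1)
          (hnodL.sublist (List.filter_sublist.map _))]
      simp only [PySem.Dict.empty, List.nil_append]
      rw [show (fun a : Int × Int => (a.1, a.2)) = fun a => a by funext a; rfl, List.map_id', hfq]
    have c2 : (merged.items.foldl (fun acc kv => if !q kv then acc.insert kv.1 kv.2 else acc)
        PySem.Dict.empty) = PySem.Dict.mk D := by
      apply PySem.Dict.ext
      rw [PySem.List.foldl_if_eq_foldl_filter]
      rw [PySem.Dict.items_foldl_insert_fresh _ Prod.fst Prod.snd _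
          (fun a _ => PySem.Dict.contains_empty a.1)
          (hnodL.sublist (List.filter_sublist.map _))]
      simp only [PySem.Dict.empty, List.nil_append]
      rw [show (fun a : Int × Int => (a.1, a.2)) = fun a => a by funext a; rfl, List.map_id', hfnq]
    rw [c1, c2]
  -- final
  show ((d1.foldl (fun acc kv =>
      if dd2.contains kv.1 then acc.insert kv.1 (pvF kv.2 (dd2.getD kv.1 0)) else acc)
      PySem.Dict.empty).items,
    (d2.foldl (fun acc kv =>
      if !dd1.contains kv.1 then acc.insert kv.1 kv.2 else acc)
      (d1.foldl (fun acc kv =>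
        if !dd2.contains kv.1 then acc.insert kv.1 kv.2 else acc)
        PySem.Dict.empty)).items) = dict_interdiff_alt d1 d2
  have hDD : (d1.foldl (fun acc kv =>
      if !dd2.contains kv.1 then acc.insert kv.1 kv.2 else acc) PySem.Dict.empty)
      = PySem.Dict.mk (d1.filter (fun kv => !dd2.contains kv.1)) := PySem.Dict.ext hA2
  show _ = dict_interdiff_alt d1 d2
  rw [hDD]
  simp only [dict_interdiff_alt]
  rw [← hdd1, ← hdd2, ← hmerged, hB]
  exact Prod.ext hA1 hA3

-- ===== VERDICT (by name: the statement is the Claim_ definition above) =====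
theorem dict_interdiff_spec : Claim_equal_dict_interdiff := by
  intro d1 d2 _ hpre
  show dict_interdiff d1 d2 = dict_interdiff_alt d1 d2
  exact dict_interdiff_eq_alt d1 d2 hpre.1 hpre.2
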